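-- pv_equiv track=rewrite | github.com/yusuf786ali/mcb185_homework | 55genefinder.py | list_of_stops
-- ===== SOURCE A (Python) =====
-- def list_of_stops(seq, frame):
-- 	stops = []
-- 	w = 3
-- 	if frame == 1:
-- 		for i in range(0, len(seq) -w +1, w):
-- 			window = seq[i:i+w]
-- 			if window == 'TAG' or window == 'TGA' or window == 'TAA':
-- 				stops.append(i+3)
-- 	if frame == 2:
-- 		for i in range(1, len(seq) -w +1, w):
-- 			window = seq[i:i+w]
-- 			if window == 'TAG' or window == 'TGA' or window == 'TAA':
-- 				stops.append(i+3)
-- 	if frame == 3: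
-- 		for i in range(2, len(seq) -w +1, w):
-- 			window = seq[i:i+w]
-- 			if window == 'TAG' or window == 'TGA' or window == 'TAA':
-- 				stops.append(i+3)
-- 	return stops
-- ===== SOURCE B (Python) =====
-- def list_of_stops(seq, frame):
--     if frame not in (1, 2, 3):
--         return []
--     stops = ('TAG', 'TGA', 'TAA')
--     return [i + 3 for i in range(len(seq) - 2)
--             if (i - (frame - 1)) % 3 == 0 and seq[i:i+3] in stops]
-- ===== Notes on version B (the rewrite author's own statement) =====
-- stated objective: alternative
-- what changed: Replaced the three fixed-start stride-3 loops with a single guard on frame plus one stride-1 comprehension over all window starts filtered by the modular frame condition (i-(frame-1)) % 3 == 0.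
import Mathlib
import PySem

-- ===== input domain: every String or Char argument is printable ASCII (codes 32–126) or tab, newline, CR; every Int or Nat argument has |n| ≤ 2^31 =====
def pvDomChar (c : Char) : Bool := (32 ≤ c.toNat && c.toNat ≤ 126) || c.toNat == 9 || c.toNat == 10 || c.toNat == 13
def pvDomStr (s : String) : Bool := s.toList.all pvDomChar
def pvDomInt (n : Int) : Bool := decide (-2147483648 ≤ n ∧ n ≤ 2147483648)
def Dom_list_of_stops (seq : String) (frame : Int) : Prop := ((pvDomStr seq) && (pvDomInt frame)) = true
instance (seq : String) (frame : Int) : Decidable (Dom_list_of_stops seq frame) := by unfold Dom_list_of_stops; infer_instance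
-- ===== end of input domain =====

-- B replaces A's three fixed-start stride-3 loops by one frame guard plus a single
-- stride-1 scan filtered by the modular frame condition; same positions, same order.

-- ===== PORT A =====
def list_of_stops (seq : String) (frame : Int) : List Int :=
  let stops : List Int := []
  let w : Int := 3
  let stops := if frame = 1 then
      (PySem.List.pyRange 0 (PySem.Str.len seq - w + 1) w).foldl (fun acc i =>
        let window := PySem.Str.slice seq (some i) (some (i + w))
        if window == "TAG" || window == "TGA" || window == "TAA" then acc ++ [i + 3] else acc) stops
    else stops
  let stops := if frame = 2 then
      (PySem.List.pyRange 1 (PySem.Str.len seq - w + 1) w).foldl (fun acc i =>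
        let window := PySem.Str.slice seq (some i) (some (i + w))
        if window == "TAG" || window == "TGA" || window == "TAA" then acc ++ [i + 3] else acc) stops
    else stops
  let stops := if frame = 3 then
      (PySem.List.pyRange 2 (PySem.Str.len seq - w + 1) w).foldl (fun acc i =>
        let window := PySem.Str.slice seq (some i) (some (i + w))
        if window == "TAG" || window == "TGA" || window == "TAA" then acc ++ [i + 3] else acc) stops
    else stops
  stops

-- ===== PORT B =====
def list_of_stops_alt (seq : String) (frame : Int) : List Int :=
  if frame = 1 ∨ frame = 2 ∨ frame = 3 then
    ((PySem.List.pyRange 0 (PySem.Str.len seq - 2) 1).filter (fun i =>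
        PySem.Int.mod (i - (frame - 1)) 3 == 0 &&
        ["TAG", "TGA", "TAA"].contains (PySem.Str.slice seq (some i) (some (i + 3))))).map (fun i => i + 3)
  else []

-- ===== PRECONDITION & SPEC =====
def Spec_list_of_stops (seq : String) (frame : Int) (out : List Int) : Prop := out = list_of_stops_alt seq frame
instance (seq : String) (frame : Int) (out : List Int) : Decidable (Spec_list_of_stops seq frame out) := by unfold Spec_list_of_stops; infer_instance

-- ===== CLAIM (what is proved, stated in full; the proofs are below) =====
def Claim_equal_list_of_stops : Prop := ∀ (seq : String) (frame : Int), Dom_list_of_stops seq frame → Spec_list_of_stops seq frame (list_of_stops seq frame)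

-- ===== LEMMAS AND PROOFS =====

-- The stride-1 range filtered by the modular condition IS the stride-3 range.
lemma filter_mod_pyRange (a b : Int) (h0 : 0 ≤ a) (h3 : a < 3) :
    (PySem.List.pyRange 0 b 1).filter (fun i => PySem.Int.mod (i - a) 3 == 0) =
    PySem.List.pyRange a b 3 := by
  have h1 : ((PySem.List.pyRange 0 b 1).filter (fun i => PySem.Int.mod (i - a) 3 == 0)).Pairwise (· < ·) :=
    (PySem.List.pairwise_lt_pyRange_one 0 b).filter _
  have h2 : (PySem.List.pyRange a b 3).Pairwise (· < ·) := by
    rw [PySem.List.pyRange_of_pos a b (by norm_num)]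
    refine List.pairwise_map.mpr ?_
    refine (List.pairwise_lt_range).imp ?_
    intro x y hxy; omega
  refine List.Perm.eq_of_pairwise (fun x y _ _ hxy hyx => absurd hyx (not_lt.mpr hxy.le)) h1 h2 ?_
  refine (List.perm_ext_iff_of_nodup (h1.imp ne_of_lt) (h2.imp ne_of_lt)).mpr ?_
  intro x
  simp only [List.mem_filter, PySem.List.mem_pyRange_one,
    PySem.List.mem_pyRange_iff_of_pos (by norm_num : (0:Int) < 3), beq_iff_eq,
    PySem.Int.mod_eq_zero_iff_dvd]
  omega

-- B's membership test equals A's or-chain on every window.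
lemma stop_test_eq (w : String) :
    (["TAG", "TGA", "TAA"].contains w) =
    (w == "TAG" || w == "TGA" || w == "TAA") := by
  have h : ∀ v : String, (w == v) = decide (w = v) := fun v => by
    cases h : w == v <;> simp_all
  simp [Bool.or_assoc, h]

-- One frame of A equals B's filtered scan for start a = frame-1.
lemma frame_loop_eq (seq : String) (a : Int) (h0 : 0 ≤ a) (h3 : a < 3) :
    (PySem.List.pyRange a (PySem.Str.len seq - 3 + 1) 3).foldl (fun acc i =>
        if PySem.Str.slice seq (some i) (some (i + 3)) == "TAG" ||
           PySem.Str.slice seq (some i) (some (i + 3)) == "TGA" ||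
           PySem.Str.slice seq (some i) (some (i + 3)) == "TAA" then acc ++ [i + 3] else acc) [] =
    ((PySem.List.pyRange 0 (PySem.Str.len seq - 2) 1).filter (fun i =>
        PySem.Int.mod (i - a) 3 == 0 &&
        ["TAG", "TGA", "TAA"].contains (PySem.Str.slice seq (some i) (some (i + 3))))).map (fun i => i + 3) := by
  rw [show PySem.Str.len seq - 3 + 1 = PySem.Str.len seq - 2 from by ring]
  rw [PySem.List.foldl_append_if]
  rw [List.nil_append]
  rw [← filter_mod_pyRange a (PySem.Str.len seq - 2) h0 h3, List.filter_filter]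
  congr 1
  apply List.filter_congr
  intro x _
  rw [stop_test_eq, Bool.and_comm]

-- ===== VERDICT (by name: the statement is the Claim_ definition above) =====
theorem list_of_stops_spec : Claim_equal_list_of_stops := by
  intro seq frame _
  unfold Spec_list_of_stops list_of_stops list_of_stops_alt
  by_cases h1 : frame = 1
  · subst h1
    simpa using frame_loop_eq seq 0 (by norm_num) (by norm_num)
  · by_cases h2 : frame = 2
    · subst h2
      simpa using frame_loop_eq seq 1 (by norm_num) (by norm_num)
    · by_cases h3 : frame = 3
      · subst h3
        simpa using frame_loop_eq seq 2 (by norm_num) (by norm_num)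
      · simp [h1, h2, h3]
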